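-- pv_equiv track=rewrite | github.com/Delaurensbot/BrabantRoyale | Royale_api.py | render_risk_left_attacks
-- ===== SOURCE A (Python) =====
-- from typing import Dict, List, Optional, Set, Tuple
--
-- def attacks_left_today(row: Dict) -> Optional[int]:
--     try:
--         used = int(row.get("decks_used_today", 0))
--     except Exception:
--         return None
--     left = 4 - used
--     if left < 0:
--         left = 0
--     if left > 4:
--         left = 4
--     return left
--
-- def bucket_open_players(rows: List[Dict]) -> Dict[int, List[str]]:
--     buckets: Dict[int, List[str]] = {4: [], 3: [], 2: [], 1: [], 0: []}
--     for r in rows: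
--         left = attacks_left_today(r)
--         if left is None:
--             continue
--         name = (r.get("name") or "").strip()
--         if not name:
--             continue
--         buckets[left].append(name)
--     return buckets
--
-- def render_risk_left_attacks(rows: List[Dict]) -> str:
--     buckets = bucket_open_players(rows)
--     out: List[str] = []
--     out.append("Spelers met nog losse aanvallen:")
--
--     any_added = False
--     for k in [3, 2, 1]:
--         names = buckets.get(k, [])
--         if not names:
--             continue
--         any_added = True
--         out.append("")
--         out.append(f"{k} attack{'s' if k != 1 else ''} left:")
--         for n in names:
--             out.append(f"- {n}")
--
--     if not any_added:
--         out.append("")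
--         out.append("Geen risico spelers gevonden (niemand met 1-3 open).")
--     return "\n".join(out)
-- ===== SOURCE B (Python) =====
-- def _attacks_left(r):
--     try:
--         return max(0, min(4, 4 - int(r.get("decks_used_today", 0))))
--     except Exception:
--         return None
--
--
-- def _section_names(rows, k):
--     return [n for n in ((r.get("name") or "").strip()
--                         for r in rows if _attacks_left(r) == k) if n]
--
--
-- def render_risk_left_attacks(rows):
--     parts = ["Spelers met nog losse aanvallen:"]
--     for k in (3, 2, 1):
--         names = _section_names(rows, k)
--         if names:
--             parts += ["", f"{k} attack{'s' if k != 1 else ''} left:"]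
--             parts += [f"- {n}" for n in names]
--     if len(parts) == 1:
--         parts += ["", "Geen risico spelers gevonden (niemand met 1-3 open)."]
--     return "\n".join(parts)
-- ===== Notes on version B (the rewrite author's own statement) =====
-- stated objective: simpler
-- what changed: B drops the five-bucket dict and the any_added flag: it collects each level's names with a direct filtered pass over rows per level (3,2,1) and detects the empty case by the output list's length.
import Mathlib
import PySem

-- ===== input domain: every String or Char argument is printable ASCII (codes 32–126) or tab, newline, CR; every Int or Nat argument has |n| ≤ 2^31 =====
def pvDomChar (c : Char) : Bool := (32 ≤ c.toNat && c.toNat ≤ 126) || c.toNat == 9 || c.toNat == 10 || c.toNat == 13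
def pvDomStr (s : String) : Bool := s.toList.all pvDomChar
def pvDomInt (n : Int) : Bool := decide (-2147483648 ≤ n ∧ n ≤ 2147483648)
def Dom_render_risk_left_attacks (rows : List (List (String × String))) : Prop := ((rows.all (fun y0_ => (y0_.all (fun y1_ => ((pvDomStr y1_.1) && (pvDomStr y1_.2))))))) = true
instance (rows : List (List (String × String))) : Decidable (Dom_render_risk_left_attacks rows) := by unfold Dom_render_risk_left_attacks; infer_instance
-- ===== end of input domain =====

-- B is a different decomposition: no bucket dict and no any_added flag — per-level filtered
-- passes plus a length check (objective: simpler; return value only, neither side mutates).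

-- ===== PORT A =====
-- attacks_left_today: int(row.get("decks_used_today", 0)), clamp via two ifs
def attacks_left_today (row : List (String × String)) : Option Int :=
  match (match (PySem.Dict.mk row).get? "decks_used_today" with
         | none => some (0 : Int)                -- default 0, int(0) = 0
         | some s => PySem.Int.ofStr? s) with
  | none => none
  | some used =>
      let left := 4 - used
      let left := if left < 0 then (0 : Int) else left
      let left := if left > 4 then (4 : Int) else left
      some left

-- bucket_open_players: dict {4:[],3:[],2:[],1:[],0:[]} filled in one pass
def bucket_open_players (rows : List (List (String × String))) : PySem.Dict Int (List String) :=
  rows.foldl (fun buckets r =>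
    match attacks_left_today r with
    | none => buckets
    | some left =>
        let name := PySem.Str.strip (((PySem.Dict.mk r).get? "name").getD "")
        if name = "" then buckets
        else buckets.modify left [] (· ++ [name]))
    (PySem.Dict.ofList [((4 : Int), ([] : List String)), (3, []), (2, []), (1, []), (0, [])])

def pyHeaderA (k : Int) : String :=
  PySem.Int.toStr k ++ " attack" ++ (if k ≠ 1 then "s" else "") ++ " left:"

def render_risk_left_attacks (rows : List (List (String × String))) : String :=
  let buckets := bucket_open_players rows
  let st := ([(3 : Int), 2, 1]).foldl (fun (st : List String × Bool) k =>
      let names := buckets.getD k []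
      if names = [] then st
      else (st.1 ++ [""] ++ [pyHeaderA k] ++ names.map (fun n => "- " ++ n), true))
    (["Spelers met nog losse aanvallen:"], false)
  let out := if st.2 = false
             then st.1 ++ ["", "Geen risico spelers gevonden (niemand met 1-3 open)."]
             else st.1
  PySem.Str.join "\n" out

-- ===== PORT B =====
-- _attacks_left: one-expression clamp via max/min
def pvAttacksLeftB (r : List (String × String)) : Option Int :=
  match (match (PySem.Dict.mk r).get? "decks_used_today" with
         | none => some (0 : Int)
         | some s => PySem.Int.ofStr? s) with
  | none => none
  | some used => some (max 0 (min 4 (4 - used)))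

-- _section_names: filtered pass over rows for one level k
def pvSectionNamesB (rows : List (List (String × String))) (k : Int) : List String :=
  ((rows.filter (fun r => pvAttacksLeftB r == some k)).map
      (fun r => PySem.Str.strip (((PySem.Dict.mk r).get? "name").getD ""))).filter
    (fun n => n ≠ "")

def render_risk_left_attacks_alt (rows : List (List (String × String))) : String :=
  let parts := ([(3 : Int), 2, 1]).foldl (fun (parts : List String) k =>
      let names := pvSectionNamesB rows k
      if names = [] then parts
      else parts ++ ["", PySem.Int.toStr k ++ " attack" ++ (if k ≠ 1 then "s" else "") ++ " left:"] ++ names.map (fun n => "- " ++ n))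
    ["Spelers met nog losse aanvallen:"]
  let parts := if parts.length = 1
               then parts ++ ["", "Geen risico spelers gevonden (niemand met 1-3 open)."]
               else parts
  PySem.Str.join "\n" parts

-- ===== PRECONDITION & SPEC =====
def Spec_render_risk_left_attacks (rows : List (List (String × String))) (out : String) : Prop := out = render_risk_left_attacks_alt rows
instance (rows : List (List (String × String))) (out : String) : Decidable (Spec_render_risk_left_attacks rows out) := by unfold Spec_render_risk_left_attacks; infer_instance

-- ===== CLAIM (what is proved, stated in full; the proofs are below) =====
def Claim_equal_render_risk_left_attacks : Prop := ∀ (rows : List (List (String × String))), Dom_render_risk_left_attacks rows → Spec_render_risk_left_attacks rows (render_risk_left_attacks rows)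

-- ===== LEMMAS AND PROOFS =====

-- The two clamps agree
theorem attacksLeft_eq (r : List (String × String)) : attacks_left_today r = pvAttacksLeftB r := by
  unfold attacks_left_today pvAttacksLeftB
  generalize (match (PySem.Dict.mk r).get? "decks_used_today" with
              | none => some (0 : Int)
              | some s => PySem.Int.ofStr? s) = o
  cases o with
  | none => rfl
  | some used =>
      have h : (if (if 4 - used < 0 then (0 : Int) else 4 - used) > 4 then (4 : Int)
                else if 4 - used < 0 then (0 : Int) else 4 - used) = max 0 (min 4 (4 - used)) := by
        split_ifs <;> omega
      exact congrArg some h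

def pvNameOf (r : List (String × String)) : String :=
  PySem.Str.strip (((PySem.Dict.mk r).get? "name").getD "")

-- the (left, name) pair a row contributes, if any
def pvPair (r : List (String × String)) : Option (Int × String) :=
  match attacks_left_today r with
  | none => none
  | some left => if pvNameOf r = "" then none else some (left, pvNameOf r)

theorem bucket_foldl_eq (rows : List (List (String × String))) (d : PySem.Dict Int (List String)) :
    rows.foldl (fun buckets r =>
      match attacks_left_today r with
      | none => buckets
      | some left =>
          let name := PySem.Str.strip (((PySem.Dict.mk r).get? "name").getD "")
          if name = "" then buckets
          else buckets.modify left [] (· ++ [name])) d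
    = (rows.filterMap pvPair).foldl (fun d p => d.modify p.1 [] (· ++ [p.2])) d := by
  induction rows generalizing d with
  | nil => rfl
  | cons r rs ih =>
      simp only [List.foldl_cons, List.filterMap_cons]
      rcases h : pvPair r with _ | p
      · unfold pvPair at h
        rcases ha : attacks_left_today r with _ | l
        · simpa [ha] using ih d
        · rw [ha] at h
          simp only [pvNameOf] at h
          by_cases hn : PySem.Str.strip (((PySem.Dict.mk r).get? "name").getD "") = ""
          · simpa [ha, hn] using ih d
          · simp [hn] at h
      · unfold pvPair at h
        rcases ha : attacks_left_today r with _ | l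
        · rw [ha] at h; simp at h
        · rw [ha] at h
          simp only [pvNameOf] at h
          by_cases hn : PySem.Str.strip (((PySem.Dict.mk r).get? "name").getD "") = ""
          · simp [hn] at h
          · simp only [hn, if_false] at h
            cases h
            simpa [ha, hn, List.foldl_cons] using ih (d.modify l [] (· ++ [pvNameOf r]))

theorem sectionNames_eq_pairs (rows : List (List (String × String))) (k : Int) :
    pvSectionNamesB rows k = ((rows.filterMap pvPair).filter (fun p => p.1 == k)).map (·.2) := by
  induction rows with
  | nil => rfl
  | cons r rs ih =>
      have hA := attacksLeft_eq r
      rcases ha : attacks_left_today r with _ | l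
      · have hb : pvAttacksLeftB r = none := hA ▸ ha
        simp_all [pvSectionNamesB, pvPair, pvNameOf]
      · have hb : pvAttacksLeftB r = some l := hA ▸ ha
        by_cases hn : pvNameOf r = "" <;> by_cases hk : l = k <;>
          simp_all [pvSectionNamesB, pvPair, pvNameOf]

theorem bucket_getD (rows : List (List (String × String))) (k : Int)
    (hk : (PySem.Dict.ofList [((4 : Int), ([] : List String)), (3, []), (2, []), (1, []), (0, [])]).getD k [] = []) :
    (bucket_open_players rows).getD k [] = pvSectionNamesB rows k := by
  unfold bucket_open_players
  rw [bucket_foldl_eq, PySem.Dict.getD_foldl_modify_append, hk, sectionNames_eq_pairs]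
  simp

-- ===== VERDICT (by name: the statement is the Claim_ definition above) =====
theorem render_risk_left_attacks_spec : Claim_equal_render_risk_left_attacks := by
  intro rows _
  unfold Spec_render_risk_left_attacks render_risk_left_attacks render_risk_left_attacks_alt
  have h3 := bucket_getD rows 3 (by decide)
  have h2 := bucket_getD rows 2 (by decide)
  have h1 := bucket_getD rows 1 (by decide)
  simp only [List.foldl_cons, List.foldl_nil, h3, h2, h1]
  by_cases e3 : pvSectionNamesB rows 3 = [] <;>
    by_cases e2 : pvSectionNamesB rows 2 = [] <;>
      by_cases e1 : pvSectionNamesB rows 1 = [] <;>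
        simp [e3, e2, e1, pyHeaderA, List.length_append]
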